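-- pv_equiv track=rewrite | github.com/elliott-not-available/leetcode | most_beautiful_item_for_each_query_2070.py | maximumBeauty
-- ===== SOURCE A (Python) =====
-- def maximumBeauty(items: list[list[int]], queries: list[int]) -> list[int]:
--     res = [0]*len(queries)
--
--     for i in range(len(queries)):
--         for j in range(len(items)):
--             if items[j][0] <= queries[i]:
--                 if items[j][1] > res[i]:
--                     res[i] = items[j][1]
--
--
--     return res
-- ===== SOURCE B (Python) =====
-- def maximumBeauty(items: list[list[int]], queries: list[int]) -> list[int]:
--     order = sorted(items, key=lambda it: it[0])
--     prices = []
--     best = []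
--     m = 0
--     for it in order:
--         m = max(m, it[1])
--         prices.append(it[0])
--         best.append(m)
--     out = []
--     for q in queries:
--         lo, hi = 0, len(prices)
--         while lo < hi:
--             mid = (lo + hi) // 2
--             if prices[mid] <= q:
--                 lo = mid + 1
--             else:
--                 hi = mid
--         out.append(best[lo - 1] if lo > 0 else 0)
--     return out
-- ===== Notes on version B (the rewrite author's own statement) =====
-- stated objective: faster
-- what changed: replaces the per-query linear scan over all items with sort-by-price + prefix-maximum beauty + a hand-written binary search per query
-- outside the precondition, e.g. on maximumBeauty([[1]], []): A returns [], B raises IndexError; on maximumBeauty([[5]], [3]): A returns [0], B raises IndexError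
import Mathlib
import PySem

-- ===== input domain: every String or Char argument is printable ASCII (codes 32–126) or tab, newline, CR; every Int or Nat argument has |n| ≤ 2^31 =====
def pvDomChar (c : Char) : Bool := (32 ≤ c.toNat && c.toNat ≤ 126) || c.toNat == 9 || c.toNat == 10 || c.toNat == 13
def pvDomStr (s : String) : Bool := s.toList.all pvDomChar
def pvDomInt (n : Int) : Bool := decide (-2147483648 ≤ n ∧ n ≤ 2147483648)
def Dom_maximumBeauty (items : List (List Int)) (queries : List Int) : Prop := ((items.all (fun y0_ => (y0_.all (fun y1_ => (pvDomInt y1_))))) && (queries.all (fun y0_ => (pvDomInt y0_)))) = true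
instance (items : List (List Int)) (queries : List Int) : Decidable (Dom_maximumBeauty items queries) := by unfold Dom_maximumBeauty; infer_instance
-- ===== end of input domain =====

-- B replaces A's per-query linear scan with sort-by-price + prefix-maximum beauty + binary search (asymptotically faster; return value only, no mutation).

-- ===== PORT A =====
-- loops over range(len(queries)) / range(len(items)); indices are always in range, so getD is exact there
def maximumBeauty (items : List (List Int)) (queries : List Int) : List Int :=
  let res : List Int := List.replicate queries.length 0
  (List.range queries.length).foldl (fun res i =>
    (List.range items.length).foldl (fun res j =>
      if (items.getD j []).getD 0 0 ≤ queries.getD i 0 then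
        if (items.getD j []).getD 1 0 > res.getD i 0 then
          res.set i ((items.getD j []).getD 1 0)
        else res
      else res) res) res

-- ===== PORT B =====
-- the hand-written while-loop binary search of Source B; lo,hi : Nat so (lo+hi)//2 is Nat division (exact: both nonnegative)
def pvBS (prices : List Int) (q : Int) (lo hi : Nat) : Nat :=
  if lo < hi then
    let mid := (lo + hi) / 2
    if prices.getD mid 0 ≤ q then pvBS prices q (mid + 1) hi
    else pvBS prices q lo mid
  else lo
termination_by hi - lo
decreasing_by all_goals omega

def maximumBeauty_alt (items : List (List Int)) (queries : List Int) : List Int :=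
  let order := PySem.List.sorted items (fun it => it.getD 0 0) false
  let s := order.foldl (fun (st : List Int × List Int × Int) it =>
    let m := max st.2.2 (it.getD 1 0)
    (st.1 ++ [it.getD 0 0], st.2.1 ++ [m], m)) (([] : List Int), ([] : List Int), (0 : Int))
  queries.foldl (fun out q =>
    let lo := pvBS s.1 q 0 s.1.length
    out ++ [if lo > 0 then s.2.1.getD (lo - 1) 0 else 0]) []

-- ===== PRECONDITION & SPEC =====
-- Pre_ excludes items lists containing an entry with fewer than 2 fields: Python A raises IndexError on them whenever
-- a query reaches the missing field, and B's sort/prefix pass reads every item's price and beauty up front, so B raises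
-- (IndexError) even on the corner inputs where A happens never to touch the missing field and returns.
def Pre_maximumBeauty (items : List (List Int)) (queries : List Int) : Prop :=
  ∀ it ∈ items, 2 ≤ it.length
instance (items : List (List Int)) (queries : List Int) : Decidable (Pre_maximumBeauty items queries) := by unfold Pre_maximumBeauty; infer_instance
def pvWitness_maximumBeauty : List (List Int) × List Int := ([[1, 2], [3, 2], [2, 4], [5, 6], [3, 5]], [1, 2, 3, 4, 5, 6])

def Spec_maximumBeauty (items : List (List Int)) (queries : List Int) (out : List Int) : Prop := out = maximumBeauty_alt items queries
instance (items : List (List Int)) (queries : List Int) (out : List Int) : Decidable (Spec_maximumBeauty items queries out) := by unfold Spec_maximumBeauty; infer_instance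

-- ===== CLAIM (what is proved, stated in full; the proofs are below) =====
def Claim_equal_maximumBeauty : Prop := ∀ (items : List (List Int)) (queries : List Int), Dom_maximumBeauty items queries → Pre_maximumBeauty items queries → Spec_maximumBeauty items queries (maximumBeauty items queries)

-- ===== LEMMAS AND PROOFS =====

-- A's per-query value: the linear scan over items
def pvAval (items : List (List Int)) (q : Int) : Int :=
  items.foldl (fun r it => if it.getD 0 0 ≤ q then (if it.getD 1 0 > r then it.getD 1 0 else r) else r) 0

-- prefix maxima with seed m
def pvPM (l : List (List Int)) (m : Int) : List Int :=
  match l with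
  | [] => []
  | it :: t => (max m (it.getD 1 0)) :: pvPM t (max m (it.getD 1 0))

lemma foldl_range_getD {α β : Type} (xs : List α) (d : α) (f : β → α → β) (init : β) :
    (List.range xs.length).foldl (fun acc j => f acc (xs.getD j d)) init = xs.foldl f init := by
  induction xs using List.reverseRecOn with
  | nil => simp
  | append_singleton ys a ih =>
    have hlen : (ys ++ [a]).length = ys.length + 1 := by simp
    rw [hlen, List.range_succ, List.foldl_append, List.foldl_append]
    have hcong : (List.range ys.length).foldl (fun acc j => f acc ((ys ++ [a]).getD j d)) init
        = (List.range ys.length).foldl (fun acc j => f acc (ys.getD j d)) init := by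
      apply PySem.List.foldl_congr_mem
      intro acc j hj
      rw [List.getD_append _ _ _ _ (List.mem_range.mp hj)]
    rw [hcong, ih]
    simp [List.getD_append_right ys [a] d ys.length (le_refl _)]

lemma foldl_congr_inv {α β : Type} (P : β → Prop) (f g : β → α → β) :
    ∀ (l : List α) (init : β), P init → (∀ acc x, P acc → x ∈ l → P (f acc x)) →
    (∀ acc x, P acc → x ∈ l → f acc x = g acc x) →
    l.foldl f init = l.foldl g init := by
  intro l
  induction l with
  | nil => intro init _ _ _; rfl
  | cons x t ih =>
    intro init hinit hpres heq
    simp only [List.foldl_cons]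
    rw [← heq init x hinit (by simp)]
    exact ih (f init x) (hpres init x hinit (by simp))
      (fun acc y hy hmem => hpres acc y hy (List.mem_cons_of_mem _ hmem))
      (fun acc y hy hmem => heq acc y hy (List.mem_cons_of_mem _ hmem))

lemma inner_loop (q : Int) :
    ∀ (its : List (List Int)) (res : List Int) (i : Nat), i < res.length →
    its.foldl (fun res it => if it.getD 0 0 ≤ q then (if it.getD 1 0 > res.getD i 0 then res.set i (it.getD 1 0) else res) else res) res
    = res.set i (its.foldl (fun r it => if it.getD 0 0 ≤ q then (if it.getD 1 0 > r then it.getD 1 0 else r) else r) (res.getD i 0)) := by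
  intro its
  induction its with
  | nil =>
    intro res i hi
    simp only [List.foldl_nil]
    apply List.ext_getElem (by simp)
    intro j h1 h2
    rw [List.getElem_set]
    split
    · next hij => subst hij; exact (List.getD_eq_getElem res 0 hi).symm
    · rfl
  | cons it t ih =>
    intro res i hi
    simp only [List.foldl_cons]
    by_cases h1 : it.getD 0 0 ≤ q
    · simp only [if_pos h1]
      by_cases h2 : it.getD 1 0 > res.getD i 0
      · simp only [if_pos h2]
        rw [ih (res.set i (it.getD 1 0)) i (by simpa using hi)]
        rw [List.set_set]
        have hv : (res.set i (it.getD 1 0)).getD i 0 = it.getD 1 0 := by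
          rw [List.getD_eq_getElem _ _ (by simpa using hi), List.getElem_set, if_pos rfl]
        rw [hv]
      · simp only [if_neg h2]
        exact ih res i hi
    · simp only [if_neg h1]
      exact ih res i hi

lemma map_range_getD {α β : Type} (xs : List α) (d : α) (h : α → β) :
    (List.range xs.length).map (fun i => h (xs.getD i d)) = xs.map h := by
  apply List.ext_getElem (by simp)
  intro j h1 h2
  simp only [List.getElem_map, List.getElem_range]
  rw [List.getD_eq_getElem xs d (by simpa using h2)]

lemma outer_loop (F : Int → Int → Int) (qs : List Int) :
    ∀ (res : List Int), qs.length ≤ res.length →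
    (List.range qs.length).foldl (fun r i => r.set i (F (qs.getD i 0) (r.getD i 0))) res
    = (List.range res.length).map (fun i => if i < qs.length then F (qs.getD i 0) (res.getD i 0) else res.getD i 0) := by
  induction qs using List.reverseRecOn with
  | nil =>
    intro res _
    simp only [List.length_nil, List.range_zero, List.foldl_nil, Nat.not_lt_zero, if_false]
    exact ((map_range_getD res 0 (fun x => x)).trans (List.map_id res)).symm
  | append_singleton ys a ih =>
    intro res hlen
    have hys : ys.length < res.length := by simp at hlen; omega
    have hlen1 : (ys ++ [a]).length = ys.length + 1 := by simp
    rw [hlen1, List.range_succ, List.foldl_append]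
    have hcong : (List.range ys.length).foldl (fun r i => r.set i (F ((ys ++ [a]).getD i 0) (r.getD i 0))) res
        = (List.range ys.length).foldl (fun r i => r.set i (F (ys.getD i 0) (r.getD i 0))) res := by
      apply PySem.List.foldl_congr_mem
      intro acc i hi
      rw [List.getD_append _ _ _ _ (List.mem_range.mp hi)]
    rw [hcong, ih res (by omega)]
    set M := (List.range res.length).map (fun i => if i < ys.length then F (ys.getD i 0) (res.getD i 0) else res.getD i 0) with hM
    have hMlen : M.length = res.length := by simp [hM]
    have hMget : M.getD ys.length 0 = res.getD ys.length 0 := by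
      rw [List.getD_eq_getElem M 0 (by omega)]
      simp only [hM, List.getElem_map, List.getElem_range]
      rw [if_neg (by omega)]
    have hlast : (ys ++ [a]).getD ys.length 0 = a := by
      rw [List.getD_append_right ys [a] 0 ys.length (le_refl _)]
      simp
    simp only [List.foldl_cons, List.foldl_nil]
    rw [hMget, hlast]
    apply List.ext_getElem (by simp [hMlen])
    intro j h1 h2
    rw [List.getElem_set]
    have hj : j < res.length := by
      have h1' := h1
      simp only [List.length_set, hMlen] at h1'
      exact h1'
    by_cases hje : ys.length = j
    · subst hje
      rw [if_pos rfl]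
      simp only [List.getElem_map, List.getElem_range]
      rw [if_pos (by omega), hlast]
    · rw [if_neg hje]
      simp only [hM, List.getElem_map, List.getElem_range]
      by_cases hjlt : j < ys.length
      · rw [if_pos hjlt, if_pos (by omega), List.getD_append _ _ _ _ hjlt]
      · rw [if_neg hjlt, if_neg (by omega)]

lemma portA_eq_map (items : List (List Int)) (queries : List Int) :
    maximumBeauty items queries = queries.map (fun q => pvAval items q) := by
  simp only [maximumBeauty]
  have hstep1 : ∀ (res : List Int) (i : Nat),
      (List.range items.length).foldl (fun res j =>
        if (items.getD j []).getD 0 0 ≤ queries.getD i 0 then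
          if (items.getD j []).getD 1 0 > res.getD i 0 then res.set i ((items.getD j []).getD 1 0)
          else res
        else res) res
      = items.foldl (fun res it =>
          if it.getD 0 0 ≤ queries.getD i 0 then
            if it.getD 1 0 > res.getD i 0 then res.set i (it.getD 1 0) else res
          else res) res := by
    intro res i
    exact foldl_range_getD items [] (fun res it =>
      if it.getD 0 0 ≤ queries.getD i 0 then
        if it.getD 1 0 > res.getD i 0 then res.set i (it.getD 1 0) else res
      else res) res
  have hcongr : (List.range queries.length).foldl (fun res i =>
      (List.range items.length).foldl (fun res j =>
        if (items.getD j []).getD 0 0 ≤ queries.getD i 0 then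
          if (items.getD j []).getD 1 0 > res.getD i 0 then res.set i ((items.getD j []).getD 1 0)
          else res
        else res) res) (List.replicate queries.length (0 : Int))
      = (List.range queries.length).foldl (fun res i =>
          res.set i ((fun q r => items.foldl (fun r it =>
            if it.getD 0 0 ≤ q then (if it.getD 1 0 > r then it.getD 1 0 else r) else r) r)
            (queries.getD i 0) (res.getD i 0))) (List.replicate queries.length (0 : Int)) := by
    apply foldl_congr_inv (fun (r : List Int) => r.length = queries.length)
    · simp
    · intro acc i hacc hi
      rw [hstep1, inner_loop _ items acc i (by rw [hacc]; exact List.mem_range.mp hi)]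
      simp [hacc]
    · intro acc i hacc hi
      rw [hstep1]
      exact inner_loop _ items acc i (by rw [hacc]; exact List.mem_range.mp hi)
  rw [hcongr, outer_loop (fun q r => items.foldl (fun r it =>
      if it.getD 0 0 ≤ q then (if it.getD 1 0 > r then it.getD 1 0 else r) else r) r) queries
      (List.replicate queries.length 0) (by simp)]
  apply List.ext_getElem (by simp)
  intro j h1 h2
  have hjq : j < queries.length := by simpa using h2
  simp only [List.getElem_map, List.getElem_range, List.length_replicate]
  rw [if_pos hjq]
  rw [List.getD_eq_getElem (List.replicate queries.length (0:Int)) 0 (by simpa using hjq),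
    List.getElem_replicate, List.getD_eq_getElem queries 0 hjq]
  rfl

lemma build_eq (l : List (List Int)) :
    ∀ (ps bs : List Int) (m : Int),
    l.foldl (fun (st : List Int × List Int × Int) it =>
      (st.1 ++ [it.getD 0 0], st.2.1 ++ [max st.2.2 (it.getD 1 0)], max st.2.2 (it.getD 1 0))) (ps, bs, m)
    = (ps ++ l.map (fun it => it.getD 0 0), bs ++ pvPM l m, l.foldl (fun m it => max m (it.getD 1 0)) m) := by
  induction l with
  | nil => intro ps bs m; simp [pvPM]
  | cons it t ih =>
    intro ps bs m
    simp only [List.foldl_cons, pvPM, List.map_cons]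
    rw [ih]
    simp [List.append_assoc]

lemma pvPM_getD (l : List (List Int)) : ∀ (k : Nat) (m : Int), k < l.length →
    (pvPM l m).getD k 0 = ((l.take (k+1)).map (fun it => it.getD 1 0)).foldl max m := by
  induction l with
  | nil => intro k m h; simp at h
  | cons it t ih =>
    intro k m hk
    cases k with
    | zero => simp [pvPM]
    | succ j =>
      simp only [pvPM, List.getD_cons_succ, List.take_succ_cons, List.map_cons, List.foldl_cons]
      exact ih j (max m (it.getD 1 0)) (by simpa using hk)

lemma sorted_getD_mono (l : List Int) (hs : l.Pairwise (· ≤ ·)) (i j : Nat)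
    (hij : i ≤ j) (hj : j < l.length) : l.getD i 0 ≤ l.getD j 0 := by
  rw [List.pairwise_iff_getElem] at hs
  rcases Nat.eq_or_lt_of_le hij with h | h
  · subst h; exact le_refl _
  · rw [List.getD_eq_getElem l 0 (by omega), List.getD_eq_getElem l 0 hj]
    exact hs i j (by omega) hj h

lemma pvBS_spec (prices : List Int) (q : Int) (hs : prices.Pairwise (· ≤ ·)) :
    ∀ (d lo hi : Nat), hi - lo ≤ d → lo ≤ hi → hi ≤ prices.length →
    (∀ k, k < lo → prices.getD k 0 ≤ q) →
    (∀ k, hi ≤ k → k < prices.length → ¬ prices.getD k 0 ≤ q) →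
    pvBS prices q lo hi ≤ prices.length ∧
    (∀ k, k < pvBS prices q lo hi → prices.getD k 0 ≤ q) ∧
    (∀ k, pvBS prices q lo hi ≤ k → k < prices.length → ¬ prices.getD k 0 ≤ q) := by
  intro d
  induction d with
  | zero =>
    intro lo hi hd hlh hhi hlow hhigh
    have hlohi : ¬ lo < hi := by omega
    rw [pvBS, if_neg hlohi]
    exact ⟨by omega, hlow, fun k hk hklen => hhigh k (by omega) hklen⟩
  | succ d ih =>
    intro lo hi hd hlh hhi hlow hhigh
    by_cases hlt : lo < hi
    · rw [pvBS, if_pos hlt]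
      simp only []
      have hm1 : lo ≤ (lo + hi) / 2 := by omega
      have hm2 : (lo + hi) / 2 < hi := by omega
      by_cases hp : prices.getD ((lo + hi) / 2) 0 ≤ q
      · rw [if_pos hp]
        apply ih ((lo + hi) / 2 + 1) hi (by omega) (by omega) hhi
        · intro k hk
          exact le_trans (sorted_getD_mono prices hs k ((lo + hi) / 2) (by omega) (by omega)) hp
        · exact hhigh
      · rw [if_neg hp]
        apply ih lo ((lo + hi) / 2) (by omega) (by omega) (by omega) hlow
        intro k hk hklen hle
        exact hp (le_trans (sorted_getD_mono prices hs ((lo + hi) / 2) k hk hklen) hle)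
    · rw [pvBS, if_neg hlt]
      exact ⟨by omega, hlow, fun k hk hklen => hhigh k (by omega) hklen⟩

lemma filter_eq_take {α : Type} (p : α → Bool) : ∀ (l : List α) (k : Nat), k ≤ l.length →
    (∀ i (h : i < l.length), i < k → p l[i] = true) →
    (∀ i (h : i < l.length), k ≤ i → p l[i] = false) →
    l.filter p = l.take k := by
  intro l
  induction l with
  | nil => intro k _ _ _; simp
  | cons x t ih =>
    intro k hk h1 h2
    cases k with
    | zero =>
      have hx : p x = false := h2 0 (by simp) (by omega)
      rw [List.take_zero, List.filter_cons_of_neg (by simp [hx])]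
      rw [ih 0 (by omega) (fun i h hik => absurd hik (by omega))
        (fun i h _ => h2 (i+1) (by simpa using Nat.succ_lt_succ h) (by omega))]
      simp
    | succ j =>
      have hx : p x = true := h1 0 (by simp) (by omega)
      rw [List.filter_cons_of_pos hx, List.take_succ_cons]
      congr 1
      exact ih j (by simpa using hk)
        (fun i h hik => h1 (i+1) (by simpa using Nat.succ_lt_succ h) (by omega))
        (fun i h hik => h2 (i+1) (by simpa using Nat.succ_lt_succ h) (by omega))

lemma ite_gt_eq_max (r b : Int) : (if b > r then b else r) = max r b := by
  rw [max_def]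
  split_ifs <;> omega

lemma foldl_max_proj (l : List (List Int)) (a : Int) :
    l.foldl (fun r it => max r (it.getD 1 0)) a = (l.map (fun it => it.getD 1 0)).foldl max a :=
  (List.foldl_map).symm

lemma per_query (items : List (List Int)) (q : Int) :
    (if pvBS ((PySem.List.sorted items (fun it => it.getD 0 0) false).map (fun it => it.getD 0 0)) q 0
        ((PySem.List.sorted items (fun it => it.getD 0 0) false).map (fun it => it.getD 0 0)).length > 0 then
      (pvPM (PySem.List.sorted items (fun it => it.getD 0 0) false) 0).getD
        (pvBS ((PySem.List.sorted items (fun it => it.getD 0 0) false).map (fun it => it.getD 0 0)) q 0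
          ((PySem.List.sorted items (fun it => it.getD 0 0) false).map (fun it => it.getD 0 0)).length - 1) 0
     else 0) = pvAval items q := by
  set order := PySem.List.sorted items (fun it => it.getD 0 0) false with horder
  set prices := order.map (fun it => it.getD 0 0) with hprices
  have hperm : order.Perm items := PySem.List.sorted_perm items _ false
  have hpair : prices.Pairwise (· ≤ ·) := PySem.List.sorted_map_key_pairwise items _
  obtain ⟨hk1, hk2, hk3⟩ := pvBS_spec prices q hpair prices.length 0 prices.length
    (by omega) (by omega) (le_refl prices.length) (fun k hk => absurd hk (Nat.not_lt_zero k))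
    (fun k hk hklen => absurd hklen (Nat.not_lt.mpr hk))
  set k := pvBS prices q 0 prices.length with hkdef
  have hlenp : prices.length = order.length := by simp [hprices]
  have hfilter : order.filter (fun it => decide (it.getD 0 0 ≤ q)) = order.take k := by
    apply filter_eq_take _ order k (by omega)
    · intro i h hik
      have hq := hk2 i hik
      rw [List.getD_eq_getElem prices 0 (by omega)] at hq
      simp only [hprices, List.getElem_map] at hq
      simpa using hq
    · intro i h hik
      have hq := hk3 i hik (by omega)
      rw [List.getD_eq_getElem prices 0 (by omega)] at hq
      simp only [hprices, List.getElem_map] at hq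
      simpa using hq
  letI : RightCommutative (max : Int → Int → Int) := ⟨fun b a1 a2 => max_right_comm b a1 a2⟩
  have hAval : pvAval items q = ((order.take k).map (fun it => it.getD 1 0)).foldl max 0 := by
    unfold pvAval
    have hfun : (fun (r : Int) (it : List Int) =>
        if it.getD 0 0 ≤ q then (if it.getD 1 0 > r then it.getD 1 0 else r) else r)
        = (fun (r : Int) (it : List Int) => if it.getD 0 0 ≤ q then max r (it.getD 1 0) else r) := by
      funext r it
      by_cases h : it.getD 0 0 ≤ q
      · simp only [if_pos h, ite_gt_eq_max]
      · simp only [if_neg h]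
    rw [hfun, PySem.List.foldl_ite_eq_foldl_filter (fun it => it.getD 0 0 ≤ q)
      (fun r it => max r (it.getD 1 0)) items 0]
    have hpf : ((items.filter (fun it => decide (it.getD 0 0 ≤ q))).map (fun it => it.getD 1 0)).Perm
        ((order.filter (fun it => decide (it.getD 0 0 ≤ q))).map (fun it => it.getD 1 0)) :=
      ((hperm.filter _).symm.map _)
    rw [foldl_max_proj, hpf.foldl_eq 0, hfilter]
  by_cases hk0 : k > 0
  · rw [if_pos hk0, pvPM_getD order (k-1) 0 (by omega), Nat.sub_add_cancel hk0, hAval]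
  · rw [if_neg hk0, hAval]
    have hk00 : k = 0 := by omega
    rw [hk00]
    simp

lemma portB_eq_map (items : List (List Int)) (queries : List Int) :
    maximumBeauty_alt items queries = queries.map (fun q => pvAval items q) := by
  simp only [maximumBeauty_alt]
  rw [build_eq (PySem.List.sorted items (fun it => it.getD 0 0) false) [] [] 0]
  simp only [List.nil_append]
  rw [PySem.List.foldl_append_singleton_eq_map (fun q =>
    if pvBS ((PySem.List.sorted items (fun it => it.getD 0 0) false).map (fun it => it.getD 0 0)) q 0
        ((PySem.List.sorted items (fun it => it.getD 0 0) false).map (fun it => it.getD 0 0)).length > 0 then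
      (pvPM (PySem.List.sorted items (fun it => it.getD 0 0) false) 0).getD
        (pvBS ((PySem.List.sorted items (fun it => it.getD 0 0) false).map (fun it => it.getD 0 0)) q 0
          ((PySem.List.sorted items (fun it => it.getD 0 0) false).map (fun it => it.getD 0 0)).length - 1) 0
     else 0) queries []]
  simp only [List.nil_append]
  exact List.map_congr_left (fun q _ => per_query items q)


-- ===== VERDICT (by name: the statement is the Claim_ definition above) =====
theorem maximumBeauty_spec : Claim_equal_maximumBeauty := by
  intro items queries _ _
  unfold Spec_maximumBeauty
  rw [portA_eq_map, portB_eq_map]
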